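-- pv_equiv track=rewrite | github.com/krvavizmaj/codechallenges | codesignal/theSmallestStringCypher.py | theSmallestStringCipher
-- ===== SOURCE A (Python) =====
-- def theSmallestStringCipher(key, message):
--     i = 0
--     j = 0
--
--     s = [["" for _ in range(len(message) + 1)] for _ in range(len(key) + 1)]
--     for i in range(1, len(message) + 1):
--         s[0][i] = s[0][i-1] + message[i-1]
--     for i in range(1, len(key) + 1):
--         s[i][0] = s[i-1][0] + key[i-1]
--
--     for i in range(1, len(key) + 1):
--         for j in range(1, len(message) + 1):
--             s[i][j] = min(s[i][j-1] + message[j-1], s[i-1][j] + key[i-1])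
--
--     return s[len(key)][len(message)]
--
-- key = "b"
--
-- message = "baa"
-- ===== SOURCE B (Python) =====
-- def _take_from_key(key, i, message, j):
--     # compare the suffixes key[i:] and message[j:], where running out of
--     # characters counts as LARGER than any character (the correct tie rule
--     # for the smallest interleaving)
--     n, m = len(key), len(message)
--     while i < n and j < m and key[i] == message[j]:
--         i += 1
--         j += 1
--     if i == n:
--         return j == m
--     if j == m:
--         return True
--     return key[i] < message[j]
--
--
-- def theSmallestStringCipher(key, message):
--     i, j = 0, 0
--     n, m = len(key), len(message)
--     out = []
--     while i < n and j < m: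
--         if _take_from_key(key, i, message, j):
--             out.append(key[i])
--             i += 1
--         else:
--             out.append(message[j])
--             j += 1
--     return ''.join(out) + key[i:] + message[j:]
-- ===== Notes on version B (the rewrite author's own statement) =====
-- stated objective: faster
-- what changed: Replaced the O(n*m) dynamic-programming table of prefix strings (each cell a string min) by a greedy single loop that emits the next character from whichever remaining suffix is smaller, comparing suffixes with end-of-string counting as largest.
import Mathlib
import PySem

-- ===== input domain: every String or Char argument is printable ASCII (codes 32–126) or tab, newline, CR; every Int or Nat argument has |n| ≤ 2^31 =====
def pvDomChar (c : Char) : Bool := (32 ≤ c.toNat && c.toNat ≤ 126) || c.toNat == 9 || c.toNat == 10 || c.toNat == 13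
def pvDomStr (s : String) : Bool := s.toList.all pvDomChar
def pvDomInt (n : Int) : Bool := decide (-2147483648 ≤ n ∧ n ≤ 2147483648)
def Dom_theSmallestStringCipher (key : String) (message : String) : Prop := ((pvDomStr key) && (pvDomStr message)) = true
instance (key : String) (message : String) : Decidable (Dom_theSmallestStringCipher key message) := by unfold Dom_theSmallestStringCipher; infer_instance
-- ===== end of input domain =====

-- B replaces A's O(n·m) table of prefix strings by a greedy merge that compares
-- the two remaining suffixes (end-of-string counting as largest); same return
-- value, measurably faster.

-- ===== PORT A =====
-- Python min(x, y) on strings: the first argument on ties.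
def pvMin (x y : List Char) : List Char := if y < x then y else x

-- s[i][j] read / write on the 2-D table (all accesses of A are in range).
def tget (s : List (List (List Char))) (i j : Nat) : List Char := (s.getD i []).getD j []
def tset (s : List (List (List Char))) (i j : Nat) (v : List Char) : List (List (List Char)) :=
  s.set i ((s.getD i []).set j v)

-- the three loops of A, as folds over the same index ranges
def aFill0 (msg : List Char) (s : List (List (List Char))) : List (List (List Char)) :=
  (List.range' 1 msg.length).foldl (fun s i => tset s 0 i (tget s 0 (i-1) ++ [msg.getD (i-1) ' '])) s

def aFillCol (k : List Char) (s : List (List (List Char))) : List (List (List Char)) :=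
  (List.range' 1 k.length).foldl (fun s i => tset s i 0 (tget s (i-1) 0 ++ [k.getD (i-1) ' '])) s

def aFillMain (k msg : List Char) (s : List (List (List Char))) : List (List (List Char)) :=
  (List.range' 1 k.length).foldl (fun s i =>
    (List.range' 1 msg.length).foldl (fun t j =>
      tset t i j (pvMin (tget t i (j-1) ++ [msg.getD (j-1) ' '])
                        (tget t (i-1) j ++ [k.getD (i-1) ' ']))) s) s

def theSmallestStringCipher (key : String) (message : String) : String :=
  String.mk (tget
    (aFillMain key.toList message.toList (aFillCol key.toList (aFill0 message.toList
      (List.replicate (key.toList.length + 1)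
        (List.replicate (message.toList.length + 1) [])))))
    key.toList.length message.toList.length)

-- ===== PORT B =====
-- B's helper _take_from_key: walk past the common prefix of the two suffixes;
-- an exhausted suffix counts as larger.
def altLe : List Char → List Char → Bool
  | [], [] => true
  | [], _ :: _ => false
  | _ :: _, [] => true
  | a :: u, b :: v => if a = b then altLe u v else decide (a < b)

-- B's main loop: take from key while _take_from_key, else from message;
-- the exhausted-side base cases are B's final  + key[i:] + message[j:].
def altGo : List Char → List Char → List Char
  | [], v => v
  | a :: u, [] => a :: u
  | a :: u, b :: v =>
    if altLe (a :: u) (b :: v) then a :: altGo u (b :: v) else b :: altGo (a :: u) v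
termination_by u v => u.length + v.length

def theSmallestStringCipher_alt (key : String) (message : String) : String :=
  String.mk (altGo key.toList message.toList)

-- ===== PRECONDITION & SPEC =====
def Spec_theSmallestStringCipher (key : String) (message : String) (out : String) : Prop := out = theSmallestStringCipher_alt key message
instance (key : String) (message : String) (out : String) : Decidable (Spec_theSmallestStringCipher key message out) := by unfold Spec_theSmallestStringCipher; infer_instance

-- ===== CLAIM (what is proved, stated in full; the proofs are below) =====
def Claim_equal_theSmallestStringCipher : Prop := ∀ (key : String) (message : String), Dom_theSmallestStringCipher key message → Spec_theSmallestStringCipher key message (theSmallestStringCipher key message)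

-- ===== LEMMAS AND PROOFS =====

-- proof-side definition: the minimum interleaving, by the suffix recurrence
def M : List Char → List Char → List Char
  | [], v => v
  | a :: u, [] => a :: u
  | a :: u, b :: v => pvMin (a :: M u (b :: v)) (b :: M (a :: u) v)
termination_by u v => u.length + v.length

theorem pvMin_eq_min (x y : List Char) : pvMin x y = min x y := by
  rcases lt_trichotomy x y with h | h | h
  · simp [pvMin, le_of_lt h, not_lt.mpr (le_of_lt h)]
  · simp [pvMin, h]
  · simp [pvMin, min_def, h, not_le.mpr h]

-- lexicographic basics on List Char
theorem cons_lt_cons_iff (a b : Char) (x y : List Char) :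
    (a :: x < b :: y) ↔ a < b ∨ (a = b ∧ x < y) := by
  constructor
  · intro h
    cases h with
    | cons h => exact Or.inr ⟨rfl, h⟩
    | rel h => exact Or.inl h
  · rintro (h | ⟨rfl, h⟩)
    · exact List.Lex.rel h
    · exact List.Lex.cons h

theorem cons_lt_cons_self (a : Char) (x y : List Char) : (a :: x < a :: y) ↔ x < y := by
  simp

theorem cons_le_cons_self (a : Char) (x y : List Char) : (a :: x ≤ a :: y) ↔ x ≤ y := by
  rw [← not_lt, ← not_lt, cons_lt_cons_self]

theorem cons_le_cons_of_lt {a b : Char} (h : a < b) (x y : List Char) : a :: x ≤ b :: y :=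
  le_of_lt ((cons_lt_cons_iff a b x y).mpr (Or.inl h))

theorem append_lt_append {x y : List Char} (h : x.length = y.length) (hlt : x < y)
    (p q : List Char) : x ++ p < y ++ q := by
  induction x generalizing y with
  | nil =>
    have : y = [] := by cases y <;> simp_all
    subst this
    exact absurd hlt (lt_irrefl _)
  | cons a x ih =>
    cases y with
    | nil => simp at h
    | cons b y =>
      rcases (cons_lt_cons_iff a b x y).mp hlt with hab | ⟨rfl, hxy⟩
      · exact (cons_lt_cons_iff a b _ _).mpr (Or.inl hab)
      · exact (cons_lt_cons_iff a a _ _).mpr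
          (Or.inr ⟨rfl, ih (by simpa using h) hxy⟩)

theorem min_append_eqlen {x y : List Char} (h : x.length = y.length) (c : Char) :
    min x y ++ [c] = min (x ++ [c]) (y ++ [c]) := by
  rcases lt_trichotomy x y with hlt | rfl | hlt
  · rw [min_eq_left (le_of_lt hlt), min_eq_left (le_of_lt (append_lt_append h hlt [c] [c]))]
  · simp
  · rw [min_eq_right (le_of_lt hlt), min_eq_right (le_of_lt (append_lt_append h.symm hlt [c] [c]))]

theorem min_cons (c : Char) (x y : List Char) : min (c :: x) (c :: y) = c :: min x y := by
  rcases le_total x y with h | h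
  · rw [min_eq_left h, min_eq_left ((cons_le_cons_self c x y).mpr h)]
  · rw [min_eq_right h, min_eq_right ((cons_le_cons_self c y x).mpr h)]

theorem M_nil_right (u : List Char) : M u [] = u := by cases u <;> simp [M]

theorem M_length (u v : List Char) : (M u v).length = u.length + v.length := by
  induction u, v using M.induct with
  | case1 v => simp [M]
  | case2 a u => simp [M]
  | case3 a u b v ih1 ih2 =>
    rw [M, pvMin]
    split <;> simp [ih1, ih2] <;> omega

theorem M_comm (u v : List Char) : M u v = M v u := by
  induction u, v using M.induct with
  | case1 v => rw [M_nil_right, M]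
  | case2 a u => rw [M_nil_right, M]
  | case3 a u b v ih1 ih2 =>
    rw [M, M, pvMin_eq_min, pvMin_eq_min, ih1, ih2, min_comm]

theorem M_le_append (u v : List Char) : M u v ≤ v ++ u := by
  induction u, v using M.induct with
  | case1 v => simp [M]
  | case2 a u => simp [M]
  | case3 a u b v ih1 ih2 =>
    rw [M, pvMin_eq_min, List.cons_append]
    exact le_trans (min_le_right _ _) ((cons_le_cons_self b _ _).mpr ih2)

theorem altLe_false : ∀ {u v : List Char}, altLe u v = false → altLe v u = true
  | [], [], h => by simp [altLe] at h
  | [], _ :: _, _ => rfl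
  | _ :: _, [], h => by simp [altLe] at h
  | a :: u, b :: v, h => by
    by_cases hab : a = b
    · subst hab
      simp only [altLe] at h ⊢
      exact altLe_false h
    · have hba : ¬ a < b := by simpa [altLe, hab] using h
      have hlt : b < a := lt_of_le_of_ne (not_lt.mp hba) (Ne.symm hab)
      simp [altLe, Ne.symm hab, hlt]

-- the key greedy inequality: if the key suffix is ≤ (end-of-string largest),
-- putting any common block w on the message side is at least as good
theorem M_shift_aux : ∀ N : Nat, ∀ u v : List Char, u.length + v.length ≤ N →
    altLe u v = true → ∀ w : List Char, M u (w ++ v) ≤ M (w ++ u) v := by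
  intro N
  induction N with
  | zero =>
    intro u v hN h w
    match u, v with
    | [], [] => simp [M, M_nil_right]
    | [], _ :: _ => simp at hN
    | _ :: _, _ => simp at hN
  | succ N ih =>
    intro u v hN h w
    match u, v with
    | [], [] => simp [M, M_nil_right]
    | [], b :: v => simp [altLe] at h
    | a :: u, [] =>
      rw [List.append_nil, M_nil_right]
      exact M_le_append (a :: u) w
    | a :: u, b :: v =>
      induction w with
      | nil => simp
      | cons x w' ihw =>
        have hL : M (a :: u) (x :: (w' ++ (b :: v))) =
            min (a :: M u (x :: (w' ++ (b :: v)))) (x :: M (a :: u) (w' ++ (b :: v))) := by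
          rw [M, pvMin_eq_min]
        have hR : M (x :: (w' ++ (a :: u))) (b :: v) =
            min (x :: M (w' ++ (a :: u)) (b :: v)) (b :: M (x :: (w' ++ (a :: u))) v) := by
          rw [M, pvMin_eq_min]
        simp only [List.cons_append]
        rw [hL, hR]
        apply le_min
        · exact le_trans (min_le_right _ _) ((cons_le_cons_self x _ _).mpr ihw)
        · by_cases hab : a = b
          · subst hab
            have h' : altLe u v = true := by simpa [altLe] using h
            have h2 := ih u v (by simp at hN ⊢; omega) h' (x :: w' ++ [a])
            have e1 : (x :: w' ++ [a]) ++ v = x :: (w' ++ (a :: v)) := by simp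
            have e2 : (x :: w' ++ [a]) ++ u = x :: (w' ++ (a :: u)) := by simp
            rw [e1, e2] at h2
            refine le_trans (min_le_left _ _) ?_
            exact (cons_le_cons_self a _ _).mpr h2
          · have hlt : a < b := by simpa [altLe, hab] using h
            exact le_trans (min_le_left _ _) (cons_le_cons_of_lt hlt _ _)

theorem M_shift (u v : List Char) (h : altLe u v = true) (w : List Char) :
    M u (w ++ v) ≤ M (w ++ u) v :=
  M_shift_aux (u.length + v.length) u v le_rfl h w

theorem take_key_le {a b : Char} {u v : List Char} (h : altLe (a :: u) (b :: v) = true) :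
    a :: M u (b :: v) ≤ b :: M (a :: u) v := by
  by_cases hab : a = b
  · subst hab
    simp only [altLe] at h
    have := M_shift u v h [a]
    simpa [cons_le_cons_self] using this
  · have hlt : a < b := by
      simp only [altLe, if_neg hab, decide_eq_true_eq] at h; exact h
    exact cons_le_cons_of_lt hlt _ _

theorem take_msg_le {a b : Char} {u v : List Char} (h : altLe (a :: u) (b :: v) = false) :
    b :: M (a :: u) v ≤ a :: M u (b :: v) := by
  have h' := altLe_false h
  have := take_key_le h'
  rwa [M_comm v (a :: u), M_comm (b :: v) u] at this

theorem altGo_eq_M (u v : List Char) : altGo u v = M u v := by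
  induction u, v using altGo.induct with
  | case1 v => rw [altGo, M]
  | case2 a u => rw [altGo, M]
  | case3 a u b v hcond ih =>
    rw [M, pvMin_eq_min]
    simp only [altGo, hcond, if_true, ih]
    exact (min_eq_left (take_key_le hcond)).symm
  | case4 a u b v hcond ih =>
    have hf : altLe (a :: u) (b :: v) = false := by
      cases h' : altLe (a :: u) (b :: v) <;> simp_all
    rw [M, pvMin_eq_min]
    simp only [altGo, hf, Bool.false_eq_true, if_false, ih]
    exact (min_eq_right (take_msg_le hf)).symm

-- the mirror (prefix) recurrence of M, used for A's table
theorem min4_comm (A B C D : List Char) :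
    min (min A B) (min C D) = min (min A C) (min B D) := by
  rw [min_assoc, min_assoc, min_left_comm B C D]

theorem M_mirror_aux : ∀ N : Nat, ∀ u v : List Char, ∀ a b : Char,
    u.length + v.length ≤ N →
    M (u ++ [a]) (v ++ [b]) = min (M (u ++ [a]) v ++ [b]) (M u (v ++ [b]) ++ [a]) := by
  intro N
  induction N with
  | zero =>
    intro u v a b hN
    match u, v with
    | [], [] => simp [M, M_nil_right, pvMin_eq_min]
    | [], _ :: _ => simp at hN
    | _ :: _, _ => simp at hN
  | succ N ih =>
    intro u v a b hN
    match u, v with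
    | [], [] => simp [M, M_nil_right, pvMin_eq_min]
    | [], d :: v' =>
      have ihv := ih [] v' a b (by simp at hN ⊢; omega)
      simp only [List.nil_append] at ihv
      have h2 : M ([] : List Char) (v' ++ [b]) = v' ++ [b] := by rw [M]
      rw [h2] at ihv
      simp only [List.cons_append, List.nil_append]
      have e1 : M [a] (d :: (v' ++ [b])) =
          min (a :: (d :: (v' ++ [b]))) (d :: M [a] (v' ++ [b])) := by
        rw [M, pvMin_eq_min, M]
      have e2 : M [a] (d :: v') =
          min (a :: (d :: v')) (d :: M [a] v') := by
        rw [M, pvMin_eq_min, M]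
      rw [e1, ihv, ← min_cons, e2,
        min_append_eqlen (by simp only [List.length_cons, M_length, List.length_append, List.length_nil]; try omega) b]
      simp only [List.cons_append, List.append_assoc, List.singleton_append]
      rw [min_assoc, M]
      simp [List.append_assoc]
    | c :: u', [] =>
      have ihu := ih u' [] a b (by simp at hN ⊢; omega)
      simp only [List.nil_append] at ihu
      rw [M_nil_right] at ihu
      simp only [List.cons_append, List.nil_append]
      have e1 : M (c :: (u' ++ [a])) [b] =
          min (c :: M (u' ++ [a]) [b]) (b :: (c :: (u' ++ [a]))) := by
        rw [M, pvMin_eq_min, M_nil_right]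
      have e2 : M (c :: u') [b] =
          min (c :: M u' [b]) (b :: (c :: u')) := by
        rw [M, pvMin_eq_min, M_nil_right]
      rw [e1, ihu, ← min_cons, e2,
        min_append_eqlen (by simp only [List.length_cons, M_length, List.length_append, List.length_nil]; try omega) a]
      simp only [List.cons_append, List.append_assoc, List.singleton_append]
      rw [min_assoc, M_nil_right]
      simp [List.append_assoc]
    | c :: u', d :: v' =>
      have ih1 := ih u' (d :: v') a b (by simp at hN ⊢; omega)
      have ih2 := ih (c :: u') v' a b (by simp at hN ⊢; omega)
      simp only [List.cons_append] at ih1 ih2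
      simp only [List.cons_append]
      have e1 : M (c :: (u' ++ [a])) (d :: (v' ++ [b])) =
          min (c :: M (u' ++ [a]) (d :: (v' ++ [b])))
              (d :: M (c :: (u' ++ [a])) (v' ++ [b])) := by
        rw [M, pvMin_eq_min]
      have e2 : M (c :: (u' ++ [a])) (d :: v') =
          min (c :: M (u' ++ [a]) (d :: v')) (d :: M (c :: (u' ++ [a])) v') := by
        rw [M, pvMin_eq_min]
      have e3 : M (c :: u') (d :: (v' ++ [b])) =
          min (c :: M u' (d :: (v' ++ [b]))) (d :: M (c :: u') (v' ++ [b])) := by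
        rw [M, pvMin_eq_min]
      rw [e1, ih1, ih2, ← min_cons, ← min_cons, e2, e3,
        min_append_eqlen (by simp only [List.length_cons, M_length, List.length_append, List.length_nil]; try omega) b,
        min_append_eqlen (by simp only [List.length_cons, M_length, List.length_append, List.length_nil]; try omega) a]
      simp only [List.cons_append]
      rw [min4_comm]

theorem M_mirror (u v : List Char) (a b : Char) :
    M (u ++ [a]) (v ++ [b]) = min (M (u ++ [a]) v ++ [b]) (M u (v ++ [b]) ++ [a]) :=
  M_mirror_aux (u.length + v.length) u v a b le_rfl

-- ===== table lemmas =====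

theorem tget_tset_self (s : List (List (List Char))) (i j : Nat) (v : List Char)
    (hi : i < s.length) (hj : j < (s.getD i []).length) :
    tget (tset s i j v) i j = v := by
  unfold tget tset
  simp only [List.getD_eq_getElem?_getD] at hj ⊢
  rw [List.getElem?_eq_getElem hi] at hj
  simp only [Option.getD_some] at hj
  simp [List.getElem?_set, hi, hj]

theorem tget_tset_other (s : List (List (List Char))) (i j i' j' : Nat) (v : List Char)
    (h : i ≠ i' ∨ j ≠ j') : tget (tset s i j v) i' j' = tget s i' j' := by
  unfold tget tset
  simp only [List.getD_eq_getElem?_getD]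
  by_cases hii : i = i'
  · subst hii
    have hjj : j ≠ j' := h.resolve_left (by simp)
    rcases Nat.lt_or_ge i s.length with hl | hl
    · simp [List.getElem?_set, hl, hjj]
    · simp [Nat.not_lt.mpr hl]
  · simp [hii]

def Twf (n m : Nat) (s : List (List (List Char))) : Prop :=
  s.length = n + 1 ∧ ∀ r ∈ s, r.length = m + 1

theorem Twf_tset {n m : Nat} {s : List (List (List Char))} (h : Twf n m s) (i j : Nat)
    (v : List Char) : Twf n m (tset s i j v) := by
  by_cases hi : i < s.length
  · refine ⟨by simp [tset, h.1], ?_⟩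
    intro r hr
    rcases List.mem_or_eq_of_mem_set hr with hr | rfl
    · exact h.2 r hr
    · rw [List.length_set, List.getD_eq_getElem _ _ hi]
      exact h.2 _ (List.getElem_mem hi)
  · unfold tset
    rw [List.set_eq_of_length_le (Nat.le_of_not_lt hi)]
    exact h

theorem Twf_rowlen {n m : Nat} {s : List (List (List Char))} (h : Twf n m s) (i : Nat)
    (hi : i ≤ n) : (s.getD i []).length = m + 1 := by
  have hlt : i < s.length := by rw [h.1]; omega
  rw [List.getD_eq_getElem _ _ hlt]
  exact h.2 _ (List.getElem_mem hlt)

-- the target value of cell (i, j)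
def G (k msg : List Char) (i j : Nat) : List Char := M (k.take i) (msg.take j)

theorem G_zero_left (k msg : List Char) (j : Nat) : G k msg 0 j = msg.take j := by
  simp [G, M]

theorem G_zero_right (k msg : List Char) (i : Nat) : G k msg i 0 = k.take i := by
  simp [G, M_nil_right]

theorem take_concat_getElem (l : List Char) (j : Nat) (hj : j < l.length) :
    l.take j ++ [l[j]] = l.take (j + 1) := by
  rw [List.take_succ]
  simp [List.getElem?_eq_getElem hj]

theorem G_succ (k msg : List Char) (i j : Nat) (hi : i < k.length) (hj : j < msg.length) :
    G k msg (i + 1) (j + 1) =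
      min (G k msg (i + 1) j ++ [msg[j]]) (G k msg i (j + 1) ++ [k[i]]) := by
  unfold G
  rw [← take_concat_getElem k i hi, ← take_concat_getElem msg j hj]
  exact M_mirror _ _ _ _

-- concat form of the index ranges
theorem range'_concat' (s t : Nat) : List.range' s (t + 1) = List.range' s t ++ [s + t] := by
  induction t generalizing s with
  | zero => simp [List.range']
  | succ t ih =>
    rw [List.range'_succ, ih (s + 1), List.range'_succ, ← List.cons_append]
    congr 2
    omega

-- loop 1: row 0 gets the prefixes of message
theorem aFill0_partial (k msg : List Char) (s : List (List (List Char)))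
    (hwf : Twf k.length msg.length s)
    (hrow0 : ∀ j, j ≤ msg.length → tget s 0 j = []) :
    ∀ t, t ≤ msg.length →
      Twf k.length msg.length
        ((List.range' 1 t).foldl
          (fun s i => tset s 0 i (tget s 0 (i-1) ++ [msg.getD (i-1) ' '])) s) ∧
      (∀ j, j ≤ t →
        tget ((List.range' 1 t).foldl
          (fun s i => tset s 0 i (tget s 0 (i-1) ++ [msg.getD (i-1) ' '])) s) 0 j
          = msg.take j) ∧
      (∀ i j, 1 ≤ i ∨ t < j →
        tget ((List.range' 1 t).foldl
          (fun s i => tset s 0 i (tget s 0 (i-1) ++ [msg.getD (i-1) ' '])) s) i j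
          = tget s i j) := by
  intro t
  induction t with
  | zero =>
    intro _
    refine ⟨hwf, ?_, ?_⟩
    · intro j hj
      have hj0 : j = 0 := Nat.le_zero.mp hj
      subst hj0
      simp [hrow0 0 (Nat.zero_le _)]
    · intro i j _; rfl
  | succ t ih =>
    intro ht
    obtain ⟨iwf, ival, ioth⟩ := ih (Nat.le_of_succ_le ht)
    rw [range'_concat', List.foldl_append, List.foldl_cons, List.foldl_nil]
    have hsub : 1 + t - 1 = t := by omega
    rw [hsub]
    have hval : tget ((List.range' 1 t).foldl
        (fun s i => tset s 0 i (tget s 0 (i-1) ++ [msg.getD (i-1) ' '])) s) 0 t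
        ++ [msg.getD t ' '] = msg.take (t + 1) := by
      rw [ival t le_rfl, List.getD_eq_getElem _ _ (by omega : t < msg.length),
        take_concat_getElem msg t (by omega)]
    rw [hval]
    refine ⟨Twf_tset iwf 0 (1 + t) _, ?_, ?_⟩
    · intro j hj
      rcases Nat.lt_or_ge j (t + 1) with hjt | hjt
      · rw [tget_tset_other _ _ _ _ _ _ (Or.inr (by omega))]
        exact ival j (by omega)
      · have hje : j = 1 + t := by omega
        subst hje
        rw [tget_tset_self _ _ _ _ (by rw [iwf.1]; omega)
          (by rw [Twf_rowlen iwf 0 (Nat.zero_le _)]; omega)]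
        rw [Nat.add_comm 1 t]
    · intro i j hc
      rcases hc with hc | hc
      · rw [tget_tset_other _ _ _ _ _ _ (Or.inl (by omega))]
        exact ioth i j (Or.inl hc)
      · rw [tget_tset_other _ _ _ _ _ _ (Or.inr (by omega))]
        exact ioth i j (Or.inr (by omega))

-- loop 2: column 0 gets the prefixes of key
theorem aFillCol_partial (k msg : List Char) (s : List (List (List Char)))
    (hwf : Twf k.length msg.length s) (h00 : tget s 0 0 = []) :
    ∀ t, t ≤ k.length →
      Twf k.length msg.length
        ((List.range' 1 t).foldl
          (fun s i => tset s i 0 (tget s (i-1) 0 ++ [k.getD (i-1) ' '])) s) ∧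
      (∀ i, i ≤ t →
        tget ((List.range' 1 t).foldl
          (fun s i => tset s i 0 (tget s (i-1) 0 ++ [k.getD (i-1) ' '])) s) i 0
          = k.take i) ∧
      (∀ i j, t < i ∨ 1 ≤ j →
        tget ((List.range' 1 t).foldl
          (fun s i => tset s i 0 (tget s (i-1) 0 ++ [k.getD (i-1) ' '])) s) i j
          = tget s i j) := by
  intro t
  induction t with
  | zero =>
    intro _
    refine ⟨hwf, ?_, ?_⟩
    · intro i hi
      have hi0 : i = 0 := Nat.le_zero.mp hi
      subst hi0
      simp [h00]
    · intro i j _; rfl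
  | succ t ih =>
    intro ht
    obtain ⟨iwf, ival, ioth⟩ := ih (Nat.le_of_succ_le ht)
    rw [range'_concat', List.foldl_append, List.foldl_cons, List.foldl_nil]
    have hsub : 1 + t - 1 = t := by omega
    rw [hsub]
    have hval : tget ((List.range' 1 t).foldl
        (fun s i => tset s i 0 (tget s (i-1) 0 ++ [k.getD (i-1) ' '])) s) t 0
        ++ [k.getD t ' '] = k.take (t + 1) := by
      rw [ival t le_rfl, List.getD_eq_getElem _ _ (by omega : t < k.length),
        take_concat_getElem k t (by omega)]
    rw [hval]
    refine ⟨Twf_tset iwf (1 + t) 0 _, ?_, ?_⟩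
    · intro i hi
      rcases Nat.lt_or_ge i (t + 1) with hit | hit
      · rw [tget_tset_other _ _ _ _ _ _ (Or.inl (by omega))]
        exact ival i (by omega)
      · have hie : i = 1 + t := by omega
        subst hie
        rw [tget_tset_self _ _ _ _ (by rw [iwf.1]; omega)
          (by rw [Twf_rowlen iwf (1 + t) (by omega)]; omega)]
        rw [Nat.add_comm 1 t]
    · intro i j hc
      rcases hc with hc | hc
      · rw [tget_tset_other _ _ _ _ _ _ (Or.inl (by omega))]
        exact ioth i j (Or.inl (by omega))
      · rw [tget_tset_other _ _ _ _ _ _ (Or.inr (by omega))]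
        exact ioth i j (Or.inr hc)

-- loop 3, inner loop: one row of the main table
theorem aFillMain_inner (k msg : List Char) (i : Nat) (hi1 : 1 ≤ i) (hi : i ≤ k.length)
    (s : List (List (List Char))) (hwf : Twf k.length msg.length s)
    (hprev : ∀ j, j ≤ msg.length → tget s (i-1) j = G k msg (i-1) j)
    (hcol : tget s i 0 = G k msg i 0) :
    ∀ t, t ≤ msg.length →
      Twf k.length msg.length
        ((List.range' 1 t).foldl
          (fun t j => tset t i j (pvMin (tget t i (j-1) ++ [msg.getD (j-1) ' '])
            (tget t (i-1) j ++ [k.getD (i-1) ' ']))) s) ∧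
      (∀ i' j, i' ≠ i →
        tget ((List.range' 1 t).foldl
          (fun t j => tset t i j (pvMin (tget t i (j-1) ++ [msg.getD (j-1) ' '])
            (tget t (i-1) j ++ [k.getD (i-1) ' ']))) s) i' j = tget s i' j) ∧
      (∀ j, j ≤ t →
        tget ((List.range' 1 t).foldl
          (fun t j => tset t i j (pvMin (tget t i (j-1) ++ [msg.getD (j-1) ' '])
            (tget t (i-1) j ++ [k.getD (i-1) ' ']))) s) i j = G k msg i j) ∧
      (∀ j, t < j →
        tget ((List.range' 1 t).foldl
          (fun t j => tset t i j (pvMin (tget t i (j-1) ++ [msg.getD (j-1) ' '])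
            (tget t (i-1) j ++ [k.getD (i-1) ' ']))) s) i j = tget s i j) := by
  intro t
  induction t with
  | zero =>
    intro _
    refine ⟨hwf, fun _ _ _ => rfl, ?_, fun _ _ => rfl⟩
    intro j hj
    have hj0 : j = 0 := Nat.le_zero.mp hj
    subst hj0
    exact hcol
  | succ t ih =>
    intro ht
    obtain ⟨iwf, ioth, ival, irest⟩ := ih (Nat.le_of_succ_le ht)
    rw [range'_concat', List.foldl_append, List.foldl_cons, List.foldl_nil]
    have hsub : 1 + t - 1 = t := by omega
    rw [hsub]
    have hv1 : tget ((List.range' 1 t).foldl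
        (fun t j => tset t i j (pvMin (tget t i (j-1) ++ [msg.getD (j-1) ' '])
          (tget t (i-1) j ++ [k.getD (i-1) ' ']))) s) i t = G k msg i t :=
      ival t le_rfl
    have hv2 : tget ((List.range' 1 t).foldl
        (fun t j => tset t i j (pvMin (tget t i (j-1) ++ [msg.getD (j-1) ' '])
          (tget t (i-1) j ++ [k.getD (i-1) ' ']))) s) (i-1) (1+t) = G k msg (i-1) (1+t) := by
      rw [ioth (i-1) (1+t) (by omega)]
      exact hprev (1+t) (by omega)
    have hval : pvMin (tget ((List.range' 1 t).foldl
          (fun t j => tset t i j (pvMin (tget t i (j-1) ++ [msg.getD (j-1) ' '])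
            (tget t (i-1) j ++ [k.getD (i-1) ' ']))) s) i t ++ [msg.getD t ' '])
        (tget ((List.range' 1 t).foldl
          (fun t j => tset t i j (pvMin (tget t i (j-1) ++ [msg.getD (j-1) ' '])
            (tget t (i-1) j ++ [k.getD (i-1) ' ']))) s) (i-1) (1+t) ++ [k.getD (i-1) ' '])
        = G k msg i (1+t) := by
      rw [hv1, hv2, pvMin_eq_min,
        List.getD_eq_getElem _ _ (by omega : t < msg.length),
        List.getD_eq_getElem _ _ (by omega : i - 1 < k.length)]
      have hieq : i - 1 + 1 = i := by omega
      have h1t : 1 + t = t + 1 := by omega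
      have hG := G_succ k msg (i-1) t (by omega) (by omega)
      rw [hieq] at hG
      rw [h1t, hG]
    rw [hval]
    refine ⟨Twf_tset iwf i (1 + t) _, ?_, ?_, ?_⟩
    · intro i' j hi'
      rw [tget_tset_other _ _ _ _ _ _ (Or.inl (by omega))]
      exact ioth i' j hi'
    · intro j hj
      rcases Nat.lt_or_ge j (t + 1) with hjt | hjt
      · rw [tget_tset_other _ _ _ _ _ _ (Or.inr (by omega))]
        exact ival j (by omega)
      · have hje : j = 1 + t := by omega
        subst hje
        rw [tget_tset_self _ _ _ _ (by rw [iwf.1]; omega)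
          (by rw [Twf_rowlen iwf i hi]; omega)]
    · intro j hj
      rw [tget_tset_other _ _ _ _ _ _ (Or.inr (by omega))]
      exact irest j (by omega)

-- loop 3, outer loop
theorem aFillMain_outer (k msg : List Char) (s : List (List (List Char)))
    (hwf : Twf k.length msg.length s)
    (hrow0 : ∀ j, j ≤ msg.length → tget s 0 j = G k msg 0 j)
    (hcol0 : ∀ i, i ≤ k.length → tget s i 0 = G k msg i 0) :
    ∀ t, t ≤ k.length →
      Twf k.length msg.length
        ((List.range' 1 t).foldl (fun s i =>
          (List.range' 1 msg.length).foldl (fun t j =>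
            tset t i j (pvMin (tget t i (j-1) ++ [msg.getD (j-1) ' '])
              (tget t (i-1) j ++ [k.getD (i-1) ' ']))) s) s) ∧
      (∀ i j, i ≤ t → j ≤ msg.length →
        tget ((List.range' 1 t).foldl (fun s i =>
          (List.range' 1 msg.length).foldl (fun t j =>
            tset t i j (pvMin (tget t i (j-1) ++ [msg.getD (j-1) ' '])
              (tget t (i-1) j ++ [k.getD (i-1) ' ']))) s) s) i j = G k msg i j) ∧
      (∀ i j, t < i →
        tget ((List.range' 1 t).foldl (fun s i =>
          (List.range' 1 msg.length).foldl (fun t j =>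
            tset t i j (pvMin (tget t i (j-1) ++ [msg.getD (j-1) ' '])
              (tget t (i-1) j ++ [k.getD (i-1) ' ']))) s) s) i j = tget s i j) := by
  intro t
  induction t with
  | zero =>
    intro _
    refine ⟨hwf, ?_, fun _ _ _ => rfl⟩
    intro i j hi hj
    have hi0 : i = 0 := Nat.le_zero.mp hi
    subst hi0
    exact hrow0 j hj
  | succ t ih =>
    intro ht
    obtain ⟨iwf, ival, ioth⟩ := ih (Nat.le_of_succ_le ht)
    rw [range'_concat', List.foldl_append, List.foldl_cons, List.foldl_nil]
    obtain ⟨jwf, joth, jval, _⟩ := aFillMain_inner k msg (1+t) (by omega) (by omega) _ iwf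
      (by
        intro j hj
        have hsub : 1 + t - 1 = t := by omega
        rw [hsub]
        exact ival t j le_rfl hj)
      (by
        rw [ioth (1+t) 0 (by omega)]
        exact hcol0 (1+t) (by omega))
      msg.length le_rfl
    refine ⟨jwf, ?_, ?_⟩
    · intro i j hi hj
      rcases Nat.lt_or_ge i (t+1) with hit | hit
      · rw [joth i j (by omega)]
        exact ival i j (by omega) hj
      · have hie : i = 1 + t := by omega
        subst hie
        exact jval j hj
    · intro i j hi
      rw [joth i j (by omega)]
      exact ioth i j (by omega)

-- the all-empty initial table
theorem tget_s0 (n m i j : Nat) :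
    tget (List.replicate (n+1) (List.replicate (m+1) ([] : List Char))) i j = [] := by
  by_cases hi : i < n + 1 <;> by_cases hj : j < m + 1 <;>
    simp [tget, List.getD_eq_getElem?_getD, hi, hj]

theorem Twf_s0 (n m : Nat) :
    Twf n m (List.replicate (n+1) (List.replicate (m+1) ([] : List Char))) := by
  refine ⟨by simp, ?_⟩
  intro r hr
  rw [List.eq_of_mem_replicate hr]
  simp

-- ===== VERDICT (by name: the statement is the Claim_ definition above) =====
theorem theSmallestStringCipher_spec : Claim_equal_theSmallestStringCipher := by
  intro key message _
  unfold Spec_theSmallestStringCipher theSmallestStringCipher theSmallestStringCipher_alt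
  have hwf0 := Twf_s0 key.toList.length message.toList.length
  obtain ⟨wf1, val1, oth1⟩ := aFill0_partial key.toList message.toList _ hwf0
    (fun j _ => tget_s0 _ _ _ _) message.toList.length le_rfl
  obtain ⟨wf2, val2, oth2⟩ := aFillCol_partial key.toList message.toList _ wf1
    (by rw [val1 0 (Nat.zero_le _)]; simp) key.toList.length le_rfl
  obtain ⟨wf3, val3, _⟩ := aFillMain_outer key.toList message.toList _ wf2
    (by
      intro j hj
      rcases Nat.eq_zero_or_pos j with rfl | hj1
      · rw [val2 0 (Nat.zero_le _), G_zero_right]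
      · rw [oth2 0 j (Or.inr hj1), val1 j hj, G_zero_left])
    (by
      intro i hi
      rw [val2 i hi, G_zero_right])
    key.toList.length le_rfl
  have hfin := val3 key.toList.length message.toList.length le_rfl le_rfl
  unfold aFillMain aFillCol aFill0
  rw [hfin]
  unfold G
  rw [List.take_length, List.take_length]
  exact congrArg String.mk (altGo_eq_M _ _).symm
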